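-- pv_equiv track=rewrite | github.com/HeoSeokYong/AlgorithmStudy | DFS/term_project.py | solution
-- ===== SOURCE A (Python) =====
-- from typing import List, Tuple, Callable
--
-- def solution(N:int, students:List[int]) -> int:
--     result = N
--     visited = [0 for _ in range(N+1)]
--
--     for i in range(1, N+1):
--         if not visited[i]:
--             group = [i]
--             visited[i] = i
--             cur = i
--
--             while not visited[students[cur]]:
--                 group.append(students[cur])
--                 visited[students[cur]] = i
--                 cur = students[cur]
--
--             if visited[students[cur]] == i:
--                 while group.pop() != students[cur]:
--                     result -= 1
--                 result -= 1
--
--     return result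
-- ===== SOURCE B (Python) =====
-- from typing import List
--
-- def solution(N: int, students: List[int]) -> int:
--     # Functional-graph view: student j points to students[j].  A node is in a
--     # friendship cycle iff it is in the image of the N-fold iterate of that map.
--     # Compute the iterate by repeated squaring of the pointer table, then count
--     # the distinct images; the answer is N minus that count.
--     if N <= 0:
--         return N
--     g = [0] + [students[j] for j in range(1, N + 1)]
--     k = 1
--     while k < N:
--         g = [g[g[j]] for j in range(N + 1)]
--         k *= 2
--     return N - len(set(g[1:]))
-- ===== Notes on version B (the rewrite author's own statement) =====
-- stated objective: alternative
-- what changed: Replaces the per-start DFS coloring with a group stack by computing the N-fold iterate of the pointer table via repeated squaring and counting its distinct images (exactly the cycle nodes); answer is N minus that count.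
-- outside the precondition, e.g. on solution(2, [1, 2, 0]): A returns -1, B returns 1; on solution(1, [5, -1]): A raises IndexError, B returns 0
import Mathlib
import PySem

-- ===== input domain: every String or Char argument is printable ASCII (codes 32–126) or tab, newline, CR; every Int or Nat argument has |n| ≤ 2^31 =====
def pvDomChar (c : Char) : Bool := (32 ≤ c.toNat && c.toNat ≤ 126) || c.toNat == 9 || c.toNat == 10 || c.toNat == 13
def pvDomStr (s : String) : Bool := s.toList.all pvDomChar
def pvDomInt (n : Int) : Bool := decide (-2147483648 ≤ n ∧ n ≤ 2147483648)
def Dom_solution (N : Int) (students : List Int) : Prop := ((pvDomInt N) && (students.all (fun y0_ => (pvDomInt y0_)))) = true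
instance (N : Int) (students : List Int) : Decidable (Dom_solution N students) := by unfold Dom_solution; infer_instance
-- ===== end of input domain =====

-- B computes the N-fold iterate of the pointer table by repeated squaring and counts its
-- distinct images (the cycle nodes) instead of A's per-start coloring walk with a group stack;
-- Pre_ restricts to the problem's natural domain (ids 1..N present and in range, or N ≤ 0).


-- ===== PORT A =====
-- inner 'while not visited[students[cur]]' loop; fuel only makes it total (N+1 suffices under Pre_)
def innerA (students : List Int) (i : Int) : Nat → List Int → List Int → Int → List Int × List Int × Int
  | 0, visited, group, cur => (visited, group, cur)
  | fuel + 1, visited, group, cur =>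
    let s := PySem.List.pyGetD students cur 0
    if PySem.List.pyGetD visited s 0 = 0 then
      innerA students i fuel (PySem.List.pySetD visited s i) (group ++ [s]) s
    else
      (visited, group, cur)

-- 'while group.pop() != students[cur]: result -= 1' ; fuel = group length suffices
def popA (target : Int) : Nat → List Int → Int → Int
  | 0, _, result => result
  | fuel + 1, group, result =>
    match PySem.List.pop? group (-1) with
    | none => result
    | some (x, rest) => if x ≠ target then popA target fuel rest (result - 1) else result

def solution (N : Int) (students : List Int) : Int :=
  (((PySem.List.pyRange 1 (N + 1) 1).foldl (fun (st : Int × List Int) i =>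
    let result := st.1
    let visited := st.2
    if PySem.List.pyGetD visited i 0 = 0 then
      let visited1 := PySem.List.pySetD visited i i
      let r := innerA students i (N + 1).toNat visited1 [i] i
      let visited2 := r.1
      let group := r.2.1
      let cur := r.2.2
      let s := PySem.List.pyGetD students cur 0
      if PySem.List.pyGetD visited2 s 0 = i then
        (popA s group.length group result - 1, visited2)
      else
        (result, visited2)
    else
      st)
    (N, (PySem.List.pyRange 0 (N + 1) 1).map (fun _ => (0 : Int))))).1

-- ===== PORT B =====
-- 'while k < N: g = [g[g[j]] for j in range(N+1)]; k *= 2' ; fuel only makes it total (N.toNat suffices)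
def bDouble (N : Int) (students0 : Unit) : Nat → List Int → Int → List Int
  | 0, g, _ => g
  | fuel + 1, g, k =>
    if k < N then
      bDouble N students0 fuel
        ((PySem.List.pyRange 0 (N + 1) 1).map
          (fun j => PySem.List.pyGetD g (PySem.List.pyGetD g j 0) 0)) (k * 2)
    else g

def solution_alt (N : Int) (students : List Int) : Int :=
  if N ≤ 0 then N
  else
    let g := (0 : Int) :: (PySem.List.pyRange 1 (N + 1) 1).map (fun j => PySem.List.pyGetD students j 0)
    let g' := bDouble N () N.toNat g 1
    N - (PySem.Set.ofList (PySem.List.slice g' (some 1) none)).length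

-- ===== PRECONDITION & SPEC =====
-- Pre_ is the problem's natural domain: N ≤ 0 (no students), or one pointer per id 1..N with every
-- pointer again an id in 1..N.  Outside it A raises IndexError, or follows node 0 / negative-index
-- wraparound and may return accidental values (see the cites in the claim).
def Pre_solution (N : Int) (students : List Int) : Prop :=
  N ≤ 0 ∨ (N < (students.length : Int) ∧
    ∀ j ∈ PySem.List.pyRange 1 (N + 1) 1,
      1 ≤ PySem.List.pyGetD students j 0 ∧ PySem.List.pyGetD students j 0 ≤ N)
instance (N : Int) (students : List Int) : Decidable (Pre_solution N students) := by
  unfold Pre_solution; infer_instance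

def pvWitness_solution : Int × List Int := (3, [7, 2, 3, 1])

def Spec_solution (N : Int) (students : List Int) (out : Int) : Prop := out = solution_alt N students
instance (N : Int) (students : List Int) (out : Int) : Decidable (Spec_solution N students out) := by unfold Spec_solution; infer_instance

-- ===== CLAIM (what is proved, stated in full; the proofs are below) =====
def Claim_equal_solution : Prop := ∀ (N : Int) (students : List Int), Dom_solution N students → Pre_solution N students → Spec_solution N students (solution N students)

-- ===== LEMMAS AND PROOFS =====

-- Proof-layer model: the pointer map as a Nat function, and the set of cycle nodes.
def GoodF (n : Nat) (f : Nat → Nat) : Prop := ∀ j : Nat, 1 ≤ j → j ≤ n → 1 ≤ f j ∧ f j ≤ n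

def cycF (n : Nat) (f : Nat → Nat) : Finset Nat :=
  (Finset.Icc 1 n).filter (fun j => ((Finset.Icc 1 n).filter (fun L => f^[L] j = j)).Nonempty)

lemma mem_cycF {n : Nat} {f : Nat → Nat} {j : Nat} :
    j ∈ cycF n f ↔ (1 ≤ j ∧ j ≤ n) ∧ ∃ L, (1 ≤ L ∧ L ≤ n) ∧ f^[L] j = j := by
  simp [cycF, Finset.Nonempty, Finset.mem_filter, Finset.mem_Icc, and_assoc]

def walkL (f : Nat → Nat) (i e : Nat) : List Nat := (List.range (e + 1)).map (fun m => f^[m] i)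

def VRep (n : Nat) (visited : List Int) (vis : Nat → Nat) : Prop :=
  visited.length = n + 1 ∧ ∀ j : Nat, j ≤ n → PySem.List.pyGetD visited (j : Int) 0 = (vis j : Int)

-- named copy of the fold body of `solution` (definitionally equal)
def stepA (students : List Int) (N : Int) (st : Int × List Int) (i : Int) : Int × List Int :=
  if PySem.List.pyGetD st.2 i 0 = 0 then
    let visited1 := PySem.List.pySetD st.2 i i
    let r := innerA students i (N + 1).toNat visited1 [i] i
    let s := PySem.List.pyGetD students r.2.2 0
    if PySem.List.pyGetD r.1 s 0 = i then
      (popA s r.2.1.length r.2.1 st.1 - 1, r.1)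
    else
      (st.1, r.1)
  else
    st

def InvA (n : Nat) (f : Nat → Nat) (d : Nat) (st : Int × List Int) : Prop :=
  ∃ vis V, VRep n st.2 vis ∧
    (∀ j, vis j ≠ 0 ↔ j ∈ V) ∧
    (∀ j, vis j ≤ d) ∧
    (V ⊆ Finset.Icc 1 n) ∧
    (∀ j ∈ V, f j ∈ V) ∧
    (∀ s : Nat, 1 ≤ s → s ≤ d → s ∈ V) ∧
    st.1 = (n : Int) - ((cycF n f) ∩ V).card

lemma solution_eq_foldl (N : Int) (students : List Int) :
    solution N students =
      ((PySem.List.pyRange 1 (N + 1) 1).foldl (stepA students N)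
        (N, (PySem.List.pyRange 0 (N + 1) 1).map (fun _ => (0 : Int)))).1 := rfl

lemma mem_walkL {f : Nat → Nat} {i e j : Nat} :
    j ∈ walkL f i e ↔ ∃ m, m ≤ e ∧ f^[m] i = j := by
  simp only [walkL, List.mem_map, List.mem_range, Nat.lt_succ_iff]

lemma iter_mem {n : Nat} {f : Nat → Nat} (hf : GoodF n f) {j : Nat}
    (h1 : 1 ≤ j) (h2 : j ≤ n) : ∀ m, 1 ≤ f^[m] j ∧ f^[m] j ≤ n := by
  intro m
  induction m with
  | zero => exact ⟨h1, h2⟩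
  | succ m ih =>
    rw [Function.iterate_succ_apply']
    exact hf _ ih.1 ih.2

lemma walk_card_le {n : Nat} {f : Nat → Nat} {i k : Nat}
    (hw : ∀ m, m ≤ k → 1 ≤ f^[m] i ∧ f^[m] i ≤ n)
    (hinj : ∀ a b, a ≤ k → b ≤ k → f^[a] i = f^[b] i → a = b) :
    k + 1 ≤ n := by
  have h := Finset.card_le_card_of_injOn (f := fun m => f^[m] i)
    (s := Finset.range (k + 1)) (t := Finset.Icc 1 n)
    (fun m hm => by
      simp only [Finset.coe_range, Set.mem_Iio, Nat.lt_succ_iff] at hm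
      exact Finset.mem_coe.mpr (Finset.mem_Icc.mpr (hw m hm)))
    (fun a ha b hb hab => by
      simp only [Finset.coe_range, Set.mem_Iio, Nat.lt_succ_iff] at ha hb
      exact hinj a b ha hb hab)
  simpa using h

lemma iter_shift (f : Nat → Nat) (i a b c : Nat) (h : a + b = c) :
    f^[a] (f^[b] i) = f^[c] i := by
  subst h; exact (Function.iterate_add_apply f a b i).symm

lemma walk_period {f : Nat → Nat} {i e t : Nat} (ht : f^[e + 1] i = f^[t] i) :
    ∀ a, f^[a + (e + 1)] i = f^[a + t] i := by
  intro a
  rw [← iter_shift f i a (e + 1) (a + (e + 1)) rfl, ht, iter_shift f i a t (a + t) rfl]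

lemma cyc_mem_of_walk {n : Nat} {f : Nat → Nat} {i e t r : Nat}
    (hw : ∀ m, m ≤ e → 1 ≤ f^[m] i ∧ f^[m] i ≤ n)
    (hinj : ∀ a b, a ≤ e → b ≤ e → f^[a] i = f^[b] i → a = b)
    (ht : f^[e + 1] i = f^[t] i) (htle : t ≤ e) (htr : t ≤ r) (hre : r ≤ e) :
    f^[r] i ∈ cycF n f := by
  have hen : e + 1 ≤ n := walk_card_le hw hinj
  rw [mem_cycF]
  refine ⟨by simpa using hw r hre, e + 1 - t, ⟨by omega, by omega⟩, ?_⟩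
  have h1 : (e + 1 - t) + r = (r - t) + (e + 1) := by omega
  have h2 : (r - t) + t = r := by omega
  calc f^[e + 1 - t] (f^[r] i) = f^[(e + 1 - t) + r] i := (Function.iterate_add_apply f _ r i).symm
    _ = f^[(r - t) + (e + 1)] i := by rw [h1]
    _ = f^[(r - t) + t] i := walk_period ht (r - t)
    _ = f^[r] i := by rw [h2]

lemma ahead_cycle {f : Nat → Nat} {i e t s : Nat}
    (ht : f^[e + 1] i = f^[t] i) (hst : s < t) (hte : t ≤ e) :
    ∀ k, 1 ≤ k → ∃ m, s < m ∧ m ≤ e ∧ f^[k] (f^[s] i) = f^[m] i := by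
  intro k
  induction k with
  | zero => omega
  | succ k ih =>
    intro _
    rcases Nat.eq_zero_or_pos k with rfl | hk
    · exact ⟨s + 1, by omega, by omega, iter_shift f i (0 + 1) s (s + 1) (by omega)⟩
    · obtain ⟨m, hsm, hme, hkm⟩ := ih hk
      have hstep : f^[k + 1] (f^[s] i) = f^[m + 1] i := by
        rw [Function.iterate_succ_apply' f k, hkm, ← Function.iterate_succ_apply' f m i]
      rcases Nat.lt_or_ge m e with hlt | hge
      · exact ⟨m + 1, by omega, by omega, hstep⟩
      · have hme' : m = e := by omega
        subst hme'
        exact ⟨t, hst, hte, by rw [hstep, ht]⟩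

lemma ahead_old {f : Nat → Nat} {i e s : Nat} {V : Finset Nat}
    (hV : f^[e + 1] i ∈ V) (hVc : ∀ j ∈ V, f j ∈ V) (hse : s ≤ e) :
    ∀ k, 1 ≤ k → f^[k] (f^[s] i) ∈ V ∨ ∃ m, s < m ∧ m ≤ e ∧ f^[k] (f^[s] i) = f^[m] i := by
  intro k
  induction k with
  | zero => omega
  | succ k ih =>
    intro _
    rcases Nat.eq_zero_or_pos k with rfl | hk
    · rcases Nat.lt_or_ge s e with hlt | hge
      · exact Or.inr ⟨s + 1, by omega, by omega, iter_shift f i (0 + 1) s (s + 1) (by omega)⟩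
      · have hse' : s = e := by omega
        refine Or.inl ?_
        rw [iter_shift f i (0 + 1) s (e + 1) (by omega)]
        exact hV
    · rcases ih hk with hin | ⟨m, hsm, hme, hkm⟩
      · exact Or.inl (by rw [Function.iterate_succ_apply' f k]; exact hVc _ hin)
      · have hstep : f^[k + 1] (f^[s] i) = f^[m + 1] i := by
          rw [Function.iterate_succ_apply' f k, hkm, ← Function.iterate_succ_apply' f m i]
        rcases Nat.lt_or_ge m e with hlt | hge
        · exact Or.inr ⟨m + 1, by omega, by omega, hstep⟩
        · have hme' : m = e := by omega
          subst hme'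
          exact Or.inl (by rw [hstep]; exact hV)

lemma notcyc_cycle {n : Nat} {f : Nat → Nat} {i e t s : Nat}
    (hinj : ∀ a b, a ≤ e → b ≤ e → f^[a] i = f^[b] i → a = b)
    (ht : f^[e + 1] i = f^[t] i) (hst : s < t) (hte : t ≤ e) :
    f^[s] i ∉ cycF n f := by
  intro hc
  rw [mem_cycF] at hc
  obtain ⟨-, L, ⟨hL1, -⟩, hfix⟩ := hc
  obtain ⟨m, hsm, hme, hkm⟩ := ahead_cycle ht hst hte L hL1
  rw [hfix] at hkm
  have := hinj m s hme (by omega) hkm.symm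
  omega

lemma notcyc_old {n : Nat} {f : Nat → Nat} {i e s : Nat} {V : Finset Nat}
    (hinj : ∀ a b, a ≤ e → b ≤ e → f^[a] i = f^[b] i → a = b)
    (hV : f^[e + 1] i ∈ V) (hVc : ∀ j ∈ V, f j ∈ V)
    (hdis : ∀ m, m ≤ e → f^[m] i ∉ V) (hse : s ≤ e) :
    f^[s] i ∉ cycF n f := by
  intro hc
  rw [mem_cycF] at hc
  obtain ⟨-, L, ⟨hL1, -⟩, hfix⟩ := hc
  rcases ahead_old hV hVc hse L hL1 with hin | ⟨m, hsm, hme, hkm⟩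
  · rw [hfix] at hin
    exact hdis s hse hin
  · rw [hfix] at hkm
    have := hinj m s hme (by omega) hkm.symm
    omega

lemma popA_spec (target : Int) :
    ∀ (suf : List Int), target ∉ suf → ∀ (fuel : Nat) (pre : List Int) (res : Int),
      suf.length < fuel →
      popA target fuel (pre ++ [target] ++ suf) res = res - suf.length := by
  intro suf
  induction suf using List.reverseRecOn with
  | nil =>
    intro _ fuel pre res hf
    match fuel with
    | fuel + 1 =>
      simp [popA, PySem.List.pop?_last]
  | append_singleton ys y ih =>
    intro hmem fuel pre res hf
    simp only [List.mem_append, List.mem_singleton, not_or] at hmem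
    match fuel with
    | fuel + 1 =>
      have hassoc : pre ++ [target] ++ (ys ++ [y]) = (pre ++ [target] ++ ys) ++ [y] := by
        simp [List.append_assoc]
      rw [hassoc]
      have hy : ¬ (y = target) := fun h => hmem.2 h.symm
      simp only [popA, PySem.List.pop?_last, ne_eq, hy, not_false_iff, if_pos]
      rw [ih hmem.1 fuel pre (res - 1) (by simp at hf ⊢; omega)]
      simp
      omega

lemma innerA_spec (students : List Int) (n : Nat)
    (f : Nat → Nat) (hgf : GoodF n f)
    (hfs : ∀ j : Nat, 1 ≤ j → j ≤ n → PySem.List.pyGetD students (j : Int) 0 = (f j : Int))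
    (i : Nat) (hi1 : 1 ≤ i) (hin : i ≤ n)
    (vis0 : Nat → Nat) :
    ∀ (fuel : Nat) (k : Nat) (visited : List Int) (vis : Nat → Nat),
      n ≤ fuel + k →
      VRep n visited vis →
      (∀ j, vis j = if j ∈ walkL f i k then i else vis0 j) →
      (∀ m, m ≤ k → vis0 (f^[m] i) = 0) →
      (∀ a b, a ≤ k → b ≤ k → f^[a] i = f^[b] i → a = b) →
      ∃ e vis' visited',
        k ≤ e ∧
        innerA students (i : Int) fuel visited ((walkL f i k).map (fun j : Nat => (j : Int))) ((f^[k] i : Nat) : Int)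
          = (visited', (walkL f i e).map (fun j : Nat => (j : Int)), ((f^[e] i : Nat) : Int)) ∧
        VRep n visited' vis' ∧
        (∀ j, vis' j = if j ∈ walkL f i e then i else vis0 j) ∧
        (∀ m, m ≤ e → vis0 (f^[m] i) = 0) ∧
        (∀ a b, a ≤ e → b ≤ e → f^[a] i = f^[b] i → a = b) ∧
        (f^[e + 1] i ∈ walkL f i e ∨ vis0 (f^[e + 1] i) ≠ 0) := by
  intro fuel
  induction fuel with
  | zero =>
    intro k visited vis hfuel hrep hvis hnew hinj
    have := walk_card_le (fun m _ => iter_mem hgf hi1 hin m) hinj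
    omega
  | succ fuel ih =>
    intro k visited vis hfuel hrep hvis hnew hinj
    have hwk := iter_mem hgf hi1 hin k
    have hwk1 := iter_mem hgf hi1 hin (k + 1)
    have hs : PySem.List.pyGetD students ((f^[k] i : Nat) : Int) 0 = ((f^[k + 1] i : Nat) : Int) := by
      rw [hfs _ hwk.1 hwk.2, Function.iterate_succ_apply' f k i]
    have htest : PySem.List.pyGetD visited (((f^[k + 1] i : Nat)) : Int) 0
        = (vis (f^[k + 1] i) : Int) := hrep.2 _ hwk1.2
    simp only [innerA, hs, htest]
    by_cases h0' : vis (f^[k + 1] i) = 0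
    · have hcast0 : ((vis (f^[k + 1] i) : Nat) : Int) = 0 := by exact_mod_cast h0'
      rw [if_pos hcast0]
      have hnotmem : f^[k + 1] i ∉ walkL f i k := by
        intro hmem
        have := hvis (f^[k + 1] i)
        rw [if_pos hmem] at this
        omega
      have hinj' : ∀ a b, a ≤ k + 1 → b ≤ k + 1 → f^[a] i = f^[b] i → a = b := by
        intro a b ha hb hab
        rcases Nat.lt_or_ge a (k + 1) with ha' | ha' <;> rcases Nat.lt_or_ge b (k + 1) with hb' | hb'
        · exact hinj a b (by omega) (by omega) hab
        · have hb'' : b = k + 1 := by omega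
          subst hb''
          exact absurd (mem_walkL.mpr ⟨a, by omega, hab⟩) hnotmem
        · have ha'' : a = k + 1 := by omega
          subst ha''
          exact absurd (mem_walkL.mpr ⟨b, by omega, hab.symm⟩) hnotmem
        · omega
      have hnew' : ∀ m, m ≤ k + 1 → vis0 (f^[m] i) = 0 := by
        intro m hm
        rcases Nat.lt_or_ge m (k + 1) with hm' | hm'
        · exact hnew m (by omega)
        · have : m = k + 1 := by omega
          subst this
          have := hvis (f^[k + 1] i)
          rw [if_neg hnotmem] at this
          omega
      have hrep' : VRep n (PySem.List.pySetD visited ((f^[k + 1] i : Nat) : Int) (i : Int))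
          (Function.update vis (f^[k + 1] i) i) := by
        constructor
        · rw [PySem.List.length_pySetD]; exact hrep.1
        · intro j hj
          rw [PySem.List.pyGetD_pySetD_natCast visited (f^[k + 1] i) j _ _ (by rw [hrep.1]; omega)]
          by_cases hje : j = f^[k + 1] i
          · subst hje
            simp [Function.update]
          · rw [if_neg hje, Function.update_of_ne hje]
            exact hrep.2 j hj
      have hvis' : ∀ j, Function.update vis (f^[k + 1] i) i j
          = if j ∈ walkL f i (k + 1) then i else vis0 j := by
        intro j
        have hsucc : walkL f i (k + 1) = walkL f i k ++ [f^[k + 1] i] := by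
          simp [walkL, List.range_succ]
        by_cases hje : j = f^[k + 1] i
        · subst hje
          rw [Function.update_self, if_pos (by simp [hsucc])]
        · rw [Function.update_of_ne hje, hvis j, hsucc]
          by_cases hjm : j ∈ walkL f i k
          · rw [if_pos hjm, if_pos (by simp [hjm])]
          · rw [if_neg hjm, if_neg (by
              intro hj2
              rcases List.mem_append.mp hj2 with h | h
              · exact hjm h
              · exact hje (List.mem_singleton.mp h))]
      have hgroup : (walkL f i k).map (fun j : Nat => (j : Int)) ++ [((f^[k + 1] i : Nat) : Int)]
          = (walkL f i (k + 1)).map (fun j : Nat => (j : Int)) := by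
        simp [walkL, List.range_succ]
      rw [hgroup]
      obtain ⟨e, vis', visited', hke, heq, h3, h4, h5, h6, h7⟩ :=
        ih (k + 1) (PySem.List.pySetD visited ((f^[k + 1] i : Nat) : Int) (i : Int))
          (Function.update vis (f^[k + 1] i) i) (by omega) hrep' hvis' hnew' hinj'
      exact ⟨e, vis', visited', by omega, heq, h3, h4, h5, h6, h7⟩
    · have hcastne : ¬ (((vis (f^[k + 1] i) : Nat) : Int) = 0) := by
        intro h; exact h0' (by exact_mod_cast h)
      rw [if_neg hcastne]
      refine ⟨k, vis, visited, le_refl k, rfl, hrep, hvis, hnew, hinj, ?_⟩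
      by_cases hmem : f^[k + 1] i ∈ walkL f i k
      · exact Or.inl hmem
      · refine Or.inr ?_
        have := hvis (f^[k + 1] i)
        rw [if_neg hmem] at this
        omega

lemma stepA_spec (students : List Int) (N : Int) (n : Nat) (hn : N.toNat = n) (hN : 1 ≤ N)
    (f : Nat → Nat) (hgf : GoodF n f)
    (hfs : ∀ j : Nat, 1 ≤ j → j ≤ n → PySem.List.pyGetD students (j : Int) 0 = (f j : Int))
    (d : Nat) (hd : d < n) (st : Int × List Int) (h : InvA n f d st) :
    InvA n f (d + 1) (stepA students N st ((d + 1 : Nat) : Int)) := by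
  obtain ⟨vis0, V, hrep, hmem, hle, hVsub, hVc, hstarts, hres⟩ := h
  set i : Nat := d + 1 with hi
  have hi1 : 1 ≤ i := by omega
  have hin : i ≤ n := by omega
  have htest0 : PySem.List.pyGetD st.2 ((i : Nat) : Int) 0 = (vis0 i : Int) := hrep.2 i hin
  by_cases hz : vis0 i = 0
  · -- start a fresh walk from i
    have h0 : ∀ j, vis0 j < i := fun j => by have := hle j; omega
    have hrep1 : VRep n (PySem.List.pySetD st.2 ((i : Nat) : Int) ((i : Nat) : Int))
        (Function.update vis0 i i) := by
      constructor
      · rw [PySem.List.length_pySetD]; exact hrep.1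
      · intro j hj
        rw [PySem.List.pyGetD_pySetD_natCast st.2 i j _ _ (by rw [hrep.1]; omega)]
        by_cases hje : j = i
        · subst hje; simp [Function.update]
        · rw [if_neg hje, Function.update_of_ne hje]
          exact hrep.2 j hj
    have hw0 : walkL f i 0 = [i] := by simp [walkL]
    have hvis1 : ∀ j, Function.update vis0 i i j = if j ∈ walkL f i 0 then i else vis0 j := by
      intro j
      rw [hw0]
      by_cases hje : j = i
      · subst hje; simp [Function.update]
      · rw [Function.update_of_ne hje, if_neg (by simp [hje])]
    obtain ⟨e, vis', visited', -, heq, hrep', hvis', hnew', hinj', hexit⟩ :=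
      innerA_spec students n f hgf hfs i hi1 hin vis0 (N + 1).toNat 0
        (PySem.List.pySetD st.2 ((i : Nat) : Int) ((i : Nat) : Int))
        (Function.update vis0 i i)
        (by omega)
        hrep1 hvis1
        (fun m hm => by simp at hm; subst hm; simpa using hz)
        (fun a b ha hb _ => by omega)
    have hwmem : ∀ m, 1 ≤ f^[m] i ∧ f^[m] i ≤ n := iter_mem hgf hi1 hin
    have hgroup0 : (walkL f i 0).map (fun j : Nat => (j : Int)) = [((i : Nat) : Int)] := by
      rw [hw0]; rfl
    have hs2 : PySem.List.pyGetD students ((f^[e] i : Nat) : Int) 0 = ((f^[e + 1] i : Nat) : Int) := by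
      rw [hfs _ (hwmem e).1 (hwmem e).2, Function.iterate_succ_apply' f e i]
    have htest2 : PySem.List.pyGetD visited' (((f^[e + 1] i : Nat)) : Int) 0
        = (vis' (f^[e + 1] i) : Int) := hrep'.2 _ (hwmem (e + 1)).2
    have hdisV : ∀ m, m ≤ e → f^[m] i ∉ V := by
      intro m hm hmV
      exact absurd ((hmem _).mpr hmV) (by simp [hnew' m hm])
    have hWsub : ∀ j ∈ (walkL f i e).toFinset, j ∈ Finset.Icc 1 n := by
      intro j hj
      obtain ⟨m, -, rfl⟩ := mem_walkL.mp (List.mem_toFinset.mp hj)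
      exact Finset.mem_Icc.mpr (hwmem m)
    have hVWdis : Disjoint V (walkL f i e).toFinset := by
      rw [Finset.disjoint_right]
      intro j hj
      obtain ⟨m, hm, rfl⟩ := mem_walkL.mp (List.mem_toFinset.mp hj)
      exact hdisV m hm
    have hinter : (cycF n f) ∩ (V ∪ (walkL f i e).toFinset)
        = ((cycF n f) ∩ V) ∪ ((cycF n f) ∩ (walkL f i e).toFinset) := by
      rw [Finset.inter_union_distrib_left]
    have hcarddis : (((cycF n f) ∩ V) ∪ ((cycF n f) ∩ (walkL f i e).toFinset)).card
        = ((cycF n f) ∩ V).card + ((cycF n f) ∩ (walkL f i e).toFinset).card := by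
      apply Finset.card_union_of_disjoint
      exact Finset.disjoint_of_subset_left Finset.inter_subset_right
        (Finset.disjoint_of_subset_right Finset.inter_subset_right hVWdis)
    have hmemW : ∀ j, j ∈ (walkL f i e).toFinset ↔ ∃ m, m ≤ e ∧ f^[m] i = j := by
      intro j; rw [List.mem_toFinset, mem_walkL]
    -- common invariant pieces for both branches
    have hmem' : ∀ j, vis' j ≠ 0 ↔ j ∈ V ∪ (walkL f i e).toFinset := by
      intro j
      rw [Finset.mem_union, hvis' j]
      by_cases hjm : j ∈ walkL f i e
      · rw [if_pos hjm]
        simp [List.mem_toFinset, hjm]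
      · rw [if_neg hjm]
        simp [List.mem_toFinset, hjm, hmem j]
    have hle' : ∀ j, vis' j ≤ d + 1 := by
      intro j
      rw [hvis' j]
      split
      · omega
      · have := hle j; omega
    have hsub' : V ∪ (walkL f i e).toFinset ⊆ Finset.Icc 1 n := by
      intro j hj
      rcases Finset.mem_union.mp hj with hj | hj
      · exact hVsub hj
      · exact hWsub j hj
    have hstarts' : ∀ s : Nat, 1 ≤ s → s ≤ d + 1 → s ∈ V ∪ (walkL f i e).toFinset := by
      intro s hs1 hs2
      rcases Nat.lt_or_ge s (d + 1) with hs | hs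
      · exact Finset.mem_union_left _ (hstarts s hs1 (by omega))
      · have hsi : s = i := by omega
        rw [hsi]
        exact Finset.mem_union_right _ ((hmemW i).mpr ⟨0, by omega, rfl⟩)
    have heq' : innerA students ((i : Nat) : Int) (N + 1).toNat
          (PySem.List.pySetD st.2 ((i : Nat) : Int) ((i : Nat) : Int)) [((i : Nat) : Int)] ((i : Nat) : Int)
        = (visited', (walkL f i e).map (fun j : Nat => (j : Int)), ((f^[e] i : Nat) : Int)) := by
      rw [hgroup0] at heq
      simpa using heq
    have hstep : stepA students N st ((i : Nat) : Int) =
        (if PySem.List.pyGetD visited' ((f^[e + 1] i : Nat) : Int) 0 = ((i : Nat) : Int) then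
          (popA ((f^[e + 1] i : Nat) : Int) ((walkL f i e).map (fun j : Nat => (j : Int))).length
            ((walkL f i e).map (fun j : Nat => (j : Int))) st.1 - 1, visited')
        else (st.1, visited')) := by
      simp only [stepA]
      rw [if_pos (by rw [htest0, hz]; norm_num)]
      rw [heq']
      simp only [hs2]
    have hlenW : ((walkL f i e).map (fun j : Nat => (j : Int))).length = e + 1 := by
      simp [walkL]
    by_cases hcyc : vis' (f^[e + 1] i) = i
    · -- the walk closed on itself: a new cycle was found
      have hwalkmem : f^[e + 1] i ∈ walkL f i e := by
        by_contra hnm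
        have := hvis' (f^[e + 1] i)
        rw [if_neg hnm] at this
        have := h0 (f^[e + 1] i)
        omega
      obtain ⟨t, hte, htw⟩ := mem_walkL.mp hwalkmem
      have ht : f^[e + 1] i = f^[t] i := htw.symm
      -- pop loop arithmetic
      have hdecomp : (walkL f i e).map (fun j : Nat => (j : Int)) =
          (((List.range t).map (fun m => f^[m] i)).map (fun j : Nat => (j : Int)) ++ [((f^[t] i : Nat) : Int)])
          ++ ((List.range (e - t)).map (fun m => f^[t + 1 + m] i)).map (fun j : Nat => (j : Int)) := by
        have h1 : e + 1 = (t + 1) + (e - t) := by omega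
        rw [walkL, h1, List.range_add, List.map_append, List.map_append, List.range_succ,
          List.map_append, List.map_append, List.map_map, List.map_map]
        simp [Function.comp]
      have hnotin : ((f^[t] i : Nat) : Int) ∉
          ((List.range (e - t)).map (fun m => f^[t + 1 + m] i)).map (fun j : Nat => (j : Int)) := by
        intro hmm
        simp only [List.mem_map, List.mem_range] at hmm
        obtain ⟨m, ⟨m', hm', rfl⟩, hmeq⟩ := hmm
        have heq2 : f^[t + 1 + m'] i = f^[t] i := by exact_mod_cast hmeq
        have := hinj' (t + 1 + m') t (by omega) (by omega) heq2
        omega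
      have hpop : popA ((f^[t] i : Nat) : Int) ((walkL f i e).map (fun j : Nat => (j : Int))).length
            ((walkL f i e).map (fun j : Nat => (j : Int))) st.1
          = st.1 - (e - t : Nat) := by
        rw [hlenW, hdecomp, popA_spec _ _ hnotin _ _ _ (by simp)]
        simp
      have hCW : (cycF n f) ∩ (walkL f i e).toFinset
          = Finset.image (fun m => f^[m] i) (Finset.Icc t e) := by
        ext j
        simp only [Finset.mem_inter, Finset.mem_image, Finset.mem_Icc]
        constructor
        · rintro ⟨hjc, hjW⟩
          obtain ⟨m, hm, rfl⟩ := (hmemW j).mp hjW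
          refine ⟨m, ⟨?_, hm⟩, rfl⟩
          by_contra hmt
          exact (notcyc_cycle hinj' ht (by omega) hte) hjc
        · rintro ⟨m, ⟨htm, hme⟩, rfl⟩
          exact ⟨cyc_mem_of_walk (fun m hm => hwmem m) hinj' ht hte htm hme,
            (hmemW _).mpr ⟨m, hme, rfl⟩⟩
      have hcardCW : ((cycF n f) ∩ (walkL f i e).toFinset).card = e - t + 1 := by
        rw [hCW, Finset.card_image_of_injOn (fun a ha b hb hab =>
          hinj' a b (by simp at ha; omega)
            (by simp at hb; omega) hab)]
        rw [Nat.card_Icc]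
        omega
      rw [hstep, if_pos (by rw [htest2]; exact_mod_cast hcyc),
        show ((f^[e + 1] i : Nat) : Int) = ((f^[t] i : Nat) : Int) from by rw [ht], hpop]
      refine ⟨vis', V ∪ (walkL f i e).toFinset, hrep', hmem', hle', hsub', ?_, hstarts', ?_⟩
      · intro j hj
        rcases Finset.mem_union.mp hj with hj | hj
        · exact Finset.mem_union_left _ (hVc j hj)
        · obtain ⟨m, hm, rfl⟩ := (hmemW j).mp hj
          refine Finset.mem_union_right _ ?_
          rw [← Function.iterate_succ_apply' f m i]
          rcases Nat.lt_or_ge m e with hme | hme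
          · exact (hmemW _).mpr ⟨m + 1, by omega, rfl⟩
          · have : m = e := by omega
            subst this
            rw [ht]
            exact (hmemW _).mpr ⟨t, hte, rfl⟩
      · show st.1 - ((e - t : Nat) : Int) - 1 = _
        rw [hinter, hcarddis, hcardCW, hres]
        push_cast
        omega
    · -- the walk ran into an earlier group: no new cycle
      have hnm : f^[e + 1] i ∉ walkL f i e := by
        intro hmm
        apply hcyc
        rw [hvis' _, if_pos hmm]
      have hVin : f^[e + 1] i ∈ V := (hmem _).mp (hexit.resolve_left hnm)
      have hCW0 : (cycF n f) ∩ (walkL f i e).toFinset = ∅ := by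
        ext j
        simp only [Finset.mem_inter, Finset.notMem_empty, iff_false, not_and]
        intro hjc hjW
        obtain ⟨m, hm, rfl⟩ := (hmemW j).mp hjW
        exact (notcyc_old hinj' hVin hVc hdisV hm) hjc
      rw [hstep, if_neg (by
        rw [htest2]
        intro hc
        exact hcyc (by exact_mod_cast hc))]
      refine ⟨vis', V ∪ (walkL f i e).toFinset, hrep', hmem', hle', hsub', ?_, hstarts', ?_⟩
      · intro j hj
        rcases Finset.mem_union.mp hj with hj | hj
        · exact Finset.mem_union_left _ (hVc j hj)
        · obtain ⟨m, hm, rfl⟩ := (hmemW j).mp hj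
          rw [← Function.iterate_succ_apply' f m i]
          rcases Nat.lt_or_ge m e with hme | hme
          · exact Finset.mem_union_right _ ((hmemW _).mpr ⟨m + 1, by omega, rfl⟩)
          · have : m = e := by omega
            subst this
            exact Finset.mem_union_left _ hVin
      · show st.1 = _
        rw [hinter, hcarddis, hCW0]
        simpa using hres
  · -- node i was already visited: the state is unchanged
    rw [stepA, if_neg (by
      rw [htest0]
      intro hcontra
      exact hz (by exact_mod_cast hcontra))]
    exact ⟨vis0, V, hrep, hmem, (fun j => by have := hle j; omega), hVsub, hVc,
      (fun s hs1 hs2 => by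
        rcases Nat.lt_or_ge s (d + 1) with hs | hs
        · exact hstarts s hs1 (by omega)
        · have : s = i := by omega
          subst this
          exact (hmem i).mp (by omega)), hres⟩

lemma outerA_spec (students : List Int) (N : Int) (n : Nat) (hn : N.toNat = n) (hN : 1 ≤ N)
    (f : Nat → Nat) (hgf : GoodF n f)
    (hfs : ∀ j : Nat, 1 ≤ j → j ≤ n → PySem.List.pyGetD students (j : Int) 0 = (f j : Int)) :
    ∀ d, d ≤ n →
      InvA n f d ((PySem.List.pyRange 1 ((d : Nat) + 1) 1).foldl (stepA students N)
        (N, (PySem.List.pyRange 0 (N + 1) 1).map (fun _ => (0 : Int)))) := by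
  intro d
  induction d with
  | zero =>
    intro _
    rw [show ((0 : Nat) : Int) + 1 = 1 by norm_num, PySem.List.pyRange_one_eq_nil (le_refl 1)]
    refine ⟨fun _ => 0, ∅, ⟨?_, ?_⟩, by simp, by simp, by simp, by simp, by omega, ?_⟩
    · simp only [List.foldl_nil, List.length_map, PySem.List.length_pyRange_one]
      omega
    · intro j hj
      simp only [List.foldl_nil]
      rw [PySem.List.pyGetD_eq_getElem _ _ (by positivity) (by
        simp only [List.length_map, PySem.List.length_pyRange_one]
        omega)]
      simp
    · simp only [List.foldl_nil]
      have : N = (n : Int) := by omega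
      simp [this]
  | succ d ih =>
    intro hd
    have hcast : (((d + 1 : Nat)) : Int) + 1 = (((d : Nat) : Int) + 1) + 1 := by push_cast; ring
    have hsplit : PySem.List.pyRange 1 (((d + 1 : Nat) : Int) + 1) 1
        = PySem.List.pyRange 1 (((d : Nat) : Int) + 1) 1 ++ [((d : Nat) : Int) + 1] := by
      rw [hcast]
      exact PySem.List.pyRange_one_succ_right (by omega)
    rw [hsplit, List.foldl_append]
    have hprev := ih (by omega)
    have := stepA_spec students N n hn hN f hgf hfs d (by omega) _ hprev
    simpa using this

lemma solutionA_val (students : List Int) (N : Int) (n : Nat) (hn : N.toNat = n) (hN : 1 ≤ N)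
    (f : Nat → Nat) (hgf : GoodF n f)
    (hfs : ∀ j : Nat, 1 ≤ j → j ≤ n → PySem.List.pyGetD students (j : Int) 0 = (f j : Int)) :
    solution N students = (n : Int) - (cycF n f).card := by
  have hNn : N = (n : Int) := by omega
  rw [solution_eq_foldl]
  have h1 : PySem.List.pyRange 1 (N + 1) 1 = PySem.List.pyRange 1 (((n : Nat) : Int) + 1) 1 := by
    rw [hNn]
  rw [h1]
  obtain ⟨vis, V, -, -, -, -, -, hstarts, hres⟩ := outerA_spec students N n hn hN f hgf hfs n (le_refl n)
  rw [hres]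
  have hsub : cycF n f ⊆ V := by
    intro c hc
    obtain ⟨⟨hc1, hc2⟩, -⟩ := mem_cycF.mp hc
    exact hstarts c hc1 hc2
  rw [Finset.inter_eq_left.mpr hsub]

-- ===== B side =====
def f0A (n : Nat) (f : Nat → Nat) (j : Nat) : Nat := if 1 ≤ j ∧ j ≤ n then f j else 0

lemma f0A_iter_eq {n : Nat} {f : Nat → Nat} (hgf : GoodF n f) {j : Nat}
    (h1 : 1 ≤ j) (h2 : j ≤ n) : ∀ m, (f0A n f)^[m] j = f^[m] j := by
  intro m
  induction m with
  | zero => rfl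
  | succ m ih =>
    rw [Function.iterate_succ_apply', Function.iterate_succ_apply', ih]
    have := iter_mem hgf h1 h2 m
    rw [f0A, if_pos this]

lemma f0A_iter_le {n : Nat} {f : Nat → Nat} (hgf : GoodF n f) :
    ∀ (m : Nat) (j : Nat), j ≤ n → (f0A n f)^[m] j ≤ n := by
  intro m
  induction m with
  | zero => intro j hj; exact hj
  | succ m ih =>
    intro j hj
    rw [Function.iterate_succ_apply']
    rw [f0A]
    split
    · next h => exact (hgf _ h.1 h.2).2
    · omega

lemma gstep_spec (N : Int) (n : Nat) (hn : N.toNat = n) (hN : 1 ≤ N)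
    (h : Nat → Nat) (hh : ∀ j, j ≤ n → h j ≤ n) :
    (PySem.List.pyRange 0 (N + 1) 1).map
        (fun j => PySem.List.pyGetD ((List.range (n + 1)).map (fun j => ((h j : Nat) : Int))) (PySem.List.pyGetD ((List.range (n + 1)).map (fun j => ((h j : Nat) : Int))) j 0) 0)
      = (List.range (n + 1)).map (fun j => ((h (h j) : Nat) : Int)) := by
  have hr : PySem.List.pyRange 0 (N + 1) 1 = (List.range (n + 1)).map (fun k : Nat => ((k : Nat) : Int)) := by
    rw [PySem.List.pyRange_one]
    have : (N + 1 - 0).toNat = n + 1 := by omega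
    rw [this]
    simp
  rw [hr, List.map_map]
  apply List.map_congr_left
  intro k hk
  simp only [List.mem_range] at hk
  have hk' : k ≤ n := by omega
  simp only [Function.comp]
  rw [PySem.List.pyGetD_natCast, PySem.List.getD_map_range _ _ _ _ (by omega),
    PySem.List.pyGetD_natCast, PySem.List.getD_map_range _ _ _ _ (by have := hh k hk'; omega)]

lemma bDouble_spec (N : Int) (n : Nat) (hn : N.toNat = n) (hN : 1 ≤ N)
    (f : Nat → Nat) (hgf : GoodF n f) :
    ∀ (fuel : Nat) (k : Int) (c : Nat), 1 ≤ k → k.toNat = c → N ≤ k * 2 ^ fuel →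
      ∃ K, n ≤ K ∧
        bDouble N () fuel ((List.range (n + 1)).map (fun j => (((f0A n f)^[c] j : Nat) : Int))) k
          = (List.range (n + 1)).map (fun j => (((f0A n f)^[K] j : Nat) : Int)) := by
  intro fuel
  induction fuel with
  | zero =>
    intro k c hk1 hc hpow
    simp only [pow_zero, mul_one] at hpow
    exact ⟨c, by omega, rfl⟩
  | succ fuel ih =>
    intro k c hk1 hc hpow
    rw [bDouble]
    by_cases hkN : k < N
    · rw [if_pos hkN]
      have hdouble := gstep_spec N n hn hN ((f0A n f)^[c]) (fun j hj => f0A_iter_le hgf c j hj)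
      rw [hdouble]
      have hiter : (List.range (n + 1)).map (fun j => (((f0A n f)^[c] ((f0A n f)^[c] j) : Nat) : Int))
          = (List.range (n + 1)).map (fun j => (((f0A n f)^[(k * 2).toNat] j : Nat) : Int)) := by
        apply List.map_congr_left
        intro j _
        rw [← Function.iterate_add_apply]
        have : c + c = (k * 2).toNat := by omega
        rw [this]
      rw [hiter]
      exact ih (k * 2) ((k * 2).toNat) (by omega) rfl (by
        calc N ≤ k * 2 ^ (fuel + 1) := hpow
          _ = (k * 2) * 2 ^ fuel := by ring)
    · rw [if_neg hkN]
      exact ⟨c, by omega, rfl⟩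

lemma cycF_closed {n : Nat} {f : Nat → Nat} (hgf : GoodF n f) {c : Nat}
    (hc : c ∈ cycF n f) : ∀ m, f^[m] c ∈ cycF n f := by
  intro m
  obtain ⟨⟨h1, h2⟩, L, hL, hfix⟩ := mem_cycF.mp hc
  refine mem_cycF.mpr ⟨by simpa using iter_mem hgf h1 h2 m, L, hL, ?_⟩
  have ha := iter_shift f c L m (L + m) rfl
  have hb := iter_shift f c m L (m + L) rfl
  rw [hfix] at hb
  rw [ha, show L + m = m + L from by omega, ← hb]

lemma cast_iter_mem_cycF {n : Nat} {f : Nat → Nat} (hgf : GoodF n f) {j : Nat}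
    (hj1 : 1 ≤ j) (hj2 : j ≤ n) {K : Nat} (hK : n ≤ K) (a b : Nat) (hlt : a < b) (hb : b ≤ n)
    (hab : f^[a] j = f^[b] j) : f^[K] j ∈ cycF n f := by
  have hfix : f^[b - a] (f^[a] j) = f^[a] j := by
    rw [iter_shift f j (b - a) a b (by omega)]
    exact hab.symm
  have hc0 : f^[a] j ∈ cycF n f :=
    mem_cycF.mpr ⟨by simpa using iter_mem hgf hj1 hj2 a, b - a, ⟨by omega, by omega⟩, hfix⟩
  have := cycF_closed hgf hc0 (K - a)
  rwa [iter_shift f j (K - a) a K (by omega)] at this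

lemma image_iter_eq_cycF {n : Nat} {f : Nat → Nat} (_hn : 1 ≤ n) (hgf : GoodF n f)
    {K : Nat} (hK : n ≤ K) :
    Finset.image (fun j => f^[K] j) (Finset.Icc 1 n) = cycF n f := by
  ext y
  constructor
  · intro hy
    obtain ⟨j, hjIcc, rfl⟩ := Finset.mem_image.mp hy
    obtain ⟨hj1, hj2⟩ := Finset.mem_Icc.mp hjIcc
    obtain ⟨a, ha, b, hb, hne, hab⟩ :=
      Finset.exists_ne_map_eq_of_card_lt_of_maps_to (s := Finset.range (n + 1))
        (t := Finset.Icc 1 n) (f := fun m => f^[m] j)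
        (by simp [Nat.card_Icc])
        (fun m _ => Finset.mem_Icc.mpr (iter_mem hgf hj1 hj2 m))
    simp only [Finset.mem_range, Nat.lt_succ_iff] at ha hb
    -- wlog a < b
    rcases Nat.lt_or_ge a b with hlt | hge
    · exact cast_iter_mem_cycF hgf hj1 hj2 hK a b hlt hb hab
    · exact cast_iter_mem_cycF hgf hj1 hj2 hK b a (by omega) ha hab.symm
  · intro hy
    obtain ⟨⟨h1, h2⟩, L, ⟨hL1, hLn⟩, hfix⟩ := mem_cycF.mp hy
    have hq : ∀ q : Nat, f^[q * L] y = y := by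
      intro q
      induction q with
      | zero => simp
      | succ q ihq =>
        have : (q + 1) * L = q * L + L := by ring
        rw [this, ← iter_shift f y (q * L) L (q * L + L) rfl, hfix, ihq]
    refine Finset.mem_image.mpr ⟨f^[K * L - K] y, Finset.mem_Icc.mpr (iter_mem hgf h1 h2 _), ?_⟩
    rw [iter_shift f y K (K * L - K) (K * L) (by
      have : K ≤ K * L := Nat.le_mul_of_pos_right K (by omega)
      omega)]
    exact hq K

lemma setLen_eq_card (xs : List Int) : (PySem.Set.ofList xs).length = xs.toFinset.card := by
  have h1 : (PySem.Set.ofList xs).toFinset = xs.toFinset := by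
    ext a
    simp [PySem.Set.mem_ofList]
  rw [← h1, List.toFinset_card_of_nodup (PySem.Set.nodup_ofList xs)]

lemma solutionB_val (students : List Int) (N : Int) (n : Nat) (hn : N.toNat = n) (hN : 1 ≤ N)
    (f : Nat → Nat) (hgf : GoodF n f)
    (hfs : ∀ j : Nat, 1 ≤ j → j ≤ n → PySem.List.pyGetD students (j : Int) 0 = (f j : Int)) :
    solution_alt N students = (n : Int) - (cycF n f).card := by
  have hn1 : 1 ≤ n := by omega
  have hginit : (0 : Int) :: (PySem.List.pyRange 1 (N + 1) 1).map (fun j => PySem.List.pyGetD students j 0)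
      = (List.range (n + 1)).map (fun j => (((f0A n f)^[1] j : Nat) : Int)) := by
    rw [List.range_succ_eq_map, List.map_cons, List.map_map]
    have hhead : (((f0A n f)^[1] 0 : Nat) : Int) = 0 := by simp [f0A]
    rw [hhead]
    congr 1
    rw [PySem.List.pyRange_one]
    have : (N + 1 - 1).toNat = n := by omega
    rw [this, List.map_map]
    apply List.map_congr_left
    intro k hk
    simp only [List.mem_range] at hk
    simp only [Function.comp]
    have hcast : (1 : Int) + (k : Int) = ((k + 1 : Nat) : Int) := by push_cast; ring
    rw [hcast, hfs (k + 1) (by omega) (by omega), Function.iterate_one, f0A,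
      if_pos ⟨by omega, by omega⟩]
  obtain ⟨K, hK, hD⟩ := bDouble_spec N n hn hN f hgf (N.toNat) 1 1 (by omega) rfl (by
    have h2 : (n : Int) < 2 ^ n := by exact_mod_cast Nat.lt_two_pow_self
    have : N = (n : Int) := by omega
    rw [hn, this]
    omega)
  have hB : solution_alt N students = N - ((PySem.Set.ofList
      (PySem.List.slice ((List.range (n + 1)).map (fun j => (((f0A n f)^[K] j : Nat) : Int))) (some 1) none)).length : Int) := by
    simp only [solution_alt]
    rw [if_neg (by omega), hginit, hD]
  rw [hB, PySem.List.slice_from _ (by norm_num), show (1 : Int).toNat = 1 from rfl]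
  have hdrop : ((List.range (n + 1)).map (fun j => (((f0A n f)^[K] j : Nat) : Int))).drop 1
      = (List.range n).map (fun k => ((f^[K] (k + 1) : Nat) : Int)) := by
    rw [List.range_succ_eq_map, List.map_cons]
    show ((List.range n).map Nat.succ).map _ = _
    rw [List.map_map]
    apply List.map_congr_left
    intro k hk
    simp only [List.mem_range] at hk
    simp only [Function.comp]
    rw [show Nat.succ k = k + 1 from rfl, f0A_iter_eq hgf (by omega) (by omega) K]
  have htfm : ((List.range n).map (fun k => ((f^[K] (k + 1) : Nat) : Int))).toFinset
      = (Finset.range n).image (fun k => ((f^[K] (k + 1) : Nat) : Int)) := by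
    ext a; simp
  rw [hdrop, setLen_eq_card, htfm]
  have hr : Finset.image (fun k : Nat => k + 1) (Finset.range n) = Finset.Icc 1 n := by
    ext a
    simp only [Finset.mem_image, Finset.mem_range, Finset.mem_Icc]
    constructor
    · rintro ⟨b, hb, rfl⟩; omega
    · intro ha; exact ⟨a - 1, by omega, by omega⟩
  have himg : Finset.image (fun k : Nat => ((f^[K] (k + 1) : Nat) : Int)) (Finset.range n)
      = Finset.image (fun c : Nat => (c : Int)) (cycF n f) := by
    rw [← image_iter_eq_cycF hn1 hgf hK, ← hr, Finset.image_image, Finset.image_image]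
    rfl
  rw [himg, Finset.card_image_of_injective _ Nat.cast_injective]
  have : N = (n : Int) := by omega
  rw [this]

-- ===== VERDICT (by name: the statement is the Claim_ definition above) =====
theorem solution_spec : Claim_equal_solution := by
  intro N students _hdom hpre
  unfold Spec_solution
  by_cases hN0 : N ≤ 0
  · -- N ≤ 0: A's loop is empty and B returns N directly
    have hnil : PySem.List.pyRange 1 (N + 1) 1 = [] := PySem.List.pyRange_one_eq_nil (by omega)
    rw [solution_eq_foldl, hnil, List.foldl_nil, solution_alt, if_pos hN0]
  · rcases hpre with hle | ⟨hlen, hvals⟩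
    · omega
    · set n := N.toNat with hn
      set f : Nat → Nat := fun j => (PySem.List.pyGetD students ((j : Nat) : Int) 0).toNat with hf
      have hval' : ∀ j : Nat, 1 ≤ j → j ≤ n →
          1 ≤ PySem.List.pyGetD students ((j : Nat) : Int) 0 ∧
          PySem.List.pyGetD students ((j : Nat) : Int) 0 ≤ N := by
        intro j h1 h2
        exact hvals ((j : Nat) : Int) (PySem.List.mem_pyRange_one.mpr ⟨by omega, by omega⟩)
      have hfs : ∀ j : Nat, 1 ≤ j → j ≤ n →
          PySem.List.pyGetD students ((j : Nat) : Int) 0 = (f j : Int) := by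
        intro j h1 h2
        have := hval' j h1 h2
        simp only [hf]
        omega
      have hgf : GoodF n f := by
        intro j h1 h2
        have := hval' j h1 h2
        simp only [hf]
        constructor <;> omega
      rw [solutionA_val students N n rfl (by omega) f hgf hfs,
        solutionB_val students N n rfl (by omega) f hgf hfs]
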